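-- pv_equiv track=rewrite | github.com/efotinis/scripts | eflib_vc_cfg.py | pfxRange
-- ===== SOURCE A (Python) =====
-- def pfxRange(a, pfx, start=0):
--     """Return the index range of the first continuous range of list items
--     starting with a prefix, or (0,0) if none found."""
--     beg = None
--     end = None
--     for i, s in enumerate(a[start:]):
--         if beg is None:
--             if s.startswith(pfx):
--                 beg = i
--         else:
--             if not s.startswith(pfx):
--                 end = i
--                 break
--     if beg is None:
--         return (0, 0)
--     if end is None:
--         end = len(a)
--     return (beg, end)
-- ===== SOURCE B (Python) =====
-- def pfxRange(a, pfx, start=0):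
--     """Return the index range of the first continuous range of list items
--     starting with a prefix, or (0,0) if none found."""
--     flags = [s.startswith(pfx) for s in a[start:]]
--     try:
--         beg = flags.index(True)
--     except ValueError:
--         return (0, 0)
--     try:
--         end = flags.index(False, beg + 1)
--     except ValueError:
--         end = len(a)
--     return (beg, end)
-- ===== Notes on version B (the rewrite author's own statement) =====
-- stated objective: alternative
-- what changed: Instead of scanning items with a mutable two-Optional state machine, B precomputes the boolean match mask of a[start:] in one comprehension and then locates the run boundaries purely with list.index(True) and list.index(False, beg+1).
import Mathlib
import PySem

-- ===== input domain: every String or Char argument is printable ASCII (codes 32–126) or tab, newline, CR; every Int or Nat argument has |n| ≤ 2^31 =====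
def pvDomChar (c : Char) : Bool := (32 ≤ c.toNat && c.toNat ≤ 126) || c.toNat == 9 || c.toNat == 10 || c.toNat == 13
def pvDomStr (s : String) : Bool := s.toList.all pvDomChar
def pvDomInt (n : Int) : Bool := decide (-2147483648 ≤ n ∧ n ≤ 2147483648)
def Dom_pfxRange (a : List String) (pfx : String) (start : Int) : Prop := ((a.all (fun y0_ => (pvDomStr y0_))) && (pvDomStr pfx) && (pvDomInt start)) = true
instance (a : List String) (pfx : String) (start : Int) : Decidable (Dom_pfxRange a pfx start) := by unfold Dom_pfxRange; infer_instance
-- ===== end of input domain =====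

-- B replaces A's stateful scan by a precomputed boolean match mask queried with list.index (alternative decomposition, same O(n) cost).

-- ===== PORT A =====
-- A's loop over enumerate(a[start:]) carrying the mutable state (i, beg, end); break is the second branch returning.
def pfxLoopA (pfx : String) : List String → Int → Option Int → Option Int × Option Int
  | [], _, beg => (beg, none)
  | s :: t, i, beg =>
    match beg with
    | none => if PySem.Str.startswith s pfx then pfxLoopA pfx t (i + 1) (some i) else pfxLoopA pfx t (i + 1) none
    | some b => if ¬ PySem.Str.startswith s pfx then (some b, some i) else pfxLoopA pfx t (i + 1) (some b)

def pfxRange (a : List String) (pfx : String) (start : Int) : Int × Int :=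
  match pfxLoopA pfx (PySem.List.slice a (some start) none) 0 none with
  | (none, _) => (0, 0)
  | (some beg, e) => (beg, e.getD (a.length : Int))

-- ===== PORT B =====
-- Source B: flags = [s.startswith(pfx) for s in a[start:]]; beg = flags.index(True) (ValueError → (0,0));
-- end = flags.index(False, beg+1) (ValueError → len(a)).  list.index(x, k) searches from position k and
-- returns the absolute index: ported exactly as index? on flags.drop k, shifted back by k.
def pfxRange_alt (a : List String) (pfx : String) (start : Int) : Int × Int :=
  let flags := (PySem.List.slice a (some start) none).map (fun s => PySem.Str.startswith s pfx)
  match PySem.List.index? flags true with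
  | none => (0, 0)
  | some beg =>
    match PySem.List.index? (flags.drop (beg + 1)) false with
    | some j => ((beg : Int), (beg : Int) + 1 + (j : Int))
    | none => ((beg : Int), (a.length : Int))

-- ===== PRECONDITION & SPEC =====
def Spec_pfxRange (a : List String) (pfx : String) (start : Int) (out : Int × Int) : Prop := out = pfxRange_alt a pfx start
instance (a : List String) (pfx : String) (start : Int) (out : Int × Int) : Decidable (Spec_pfxRange a pfx start out) := by unfold Spec_pfxRange; infer_instance

-- ===== CLAIM (what is proved, stated in full; the proofs are below) =====
def Claim_equal_pfxRange : Prop := ∀ (a : List String) (pfx : String) (start : Int), Dom_pfxRange a pfx start → Spec_pfxRange a pfx start (pfxRange a pfx start)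

-- ===== LEMMAS AND PROOFS =====

-- proof-only characterisations of A's loop: the first matching index, and the first later non-matching index
def pfxScanHit (pfx : String) : List String → Int → Option Int
  | [], _ => none
  | s :: t, i => if PySem.Str.startswith s pfx then some i else pfxScanHit pfx t (i + 1)

def pfxScanMiss (pfx : String) : List String → Int → Option Int
  | [], _ => none
  | s :: t, i => if PySem.Str.startswith s pfx then pfxScanMiss pfx t (i + 1) else some i

lemma pfxScanHit_ge (pfx : String) : ∀ (l : List String) (i b : Int), pfxScanHit pfx l i = some b → i ≤ b := by
  intro l
  induction l with
  | nil => intro i b h; simp [pfxScanHit] at h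
  | cons s t ih =>
    intro i b h
    simp only [pfxScanHit] at h
    split at h
    · have := Option.some.inj h; omega
    · have := ih (i + 1) b h; omega

lemma pfxLoopA_some (pfx : String) : ∀ (l : List String) (i b : Int),
    pfxLoopA pfx l i (some b) = (some b, pfxScanMiss pfx l i) := by
  intro l
  induction l with
  | nil => intro i b; simp [pfxLoopA, pfxScanMiss]
  | cons s t ih =>
    intro i b
    by_cases h : PySem.Chars.startswith s.toList pfx.toList = true
    · simp [pfxLoopA, pfxScanMiss, h, ih]
    · simp [pfxLoopA, pfxScanMiss, h]

lemma pfxLoopA_none (pfx : String) : ∀ (l : List String) (i : Int),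
    pfxLoopA pfx l i none =
      match pfxScanHit pfx l i with
      | none => (none, none)
      | some b => (some b, pfxScanMiss pfx (l.drop ((b - i).toNat + 1)) (b + 1)) := by
  intro l
  induction l with
  | nil => intro i; simp [pfxLoopA, pfxScanHit]
  | cons s t ih =>
    intro i
    by_cases h : PySem.Chars.startswith s.toList pfx.toList = true
    · simp [pfxLoopA, pfxScanHit, h, pfxLoopA_some]
    · have hA : pfxLoopA pfx (s :: t) i none = pfxLoopA pfx t (i + 1) none := by
        simp [pfxLoopA, h]
      have hS : pfxScanHit pfx (s :: t) i = pfxScanHit pfx t (i + 1) := by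
        simp [pfxScanHit, h]
      rw [hA, hS, ih]
      cases hs : pfxScanHit pfx t (i + 1) with
      | none => rfl
      | some b =>
        have hb := pfxScanHit_ge pfx t (i + 1) b hs
        have hd : (b - i).toNat + 1 = ((b - (i + 1)).toNat + 1) + 1 := by omega
        simp only [hd, List.drop_succ_cons]

-- the scan helpers are index? on the boolean mask, shifted by the starting counter
lemma pfxScanHit_eq_index (pfx : String) : ∀ (l : List String) (i : Int),
    pfxScanHit pfx l i =
      (PySem.List.index? (l.map (fun s => PySem.Str.startswith s pfx)) true).map (fun j : Nat => i + (j : Int)) := by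
  intro l
  induction l with
  | nil => intro i; simp [pfxScanHit, PySem.List.index?]
  | cons s t ih =>
    intro i
    by_cases h : PySem.Chars.startswith s.toList pfx.toList = true
    · simp [pfxScanHit, h, PySem.List.index?, List.idxOf?, List.findIdx?_cons]
    · simp [pfxScanHit, h, PySem.List.index?, List.idxOf?, List.findIdx?_cons, List.findIdx?_map, ih]
      cases List.findIdx? ((fun x => x) ∘ fun s => PySem.Chars.startswith s.toList pfx.toList) t with
      | none => simp
      | some j => simp; ring

lemma pfxScanMiss_eq_index (pfx : String) : ∀ (l : List String) (i : Int),
    pfxScanMiss pfx l i =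
      (PySem.List.index? (l.map (fun s => PySem.Str.startswith s pfx)) false).map (fun j : Nat => i + (j : Int)) := by
  intro l
  induction l with
  | nil => intro i; simp [pfxScanMiss, PySem.List.index?]
  | cons s t ih =>
    intro i
    by_cases h : PySem.Chars.startswith s.toList pfx.toList = true
    · simp [pfxScanMiss, h, PySem.List.index?, List.idxOf?, List.findIdx?_cons, List.findIdx?_map, ih]
      cases List.findIdx? ((fun x => !x) ∘ fun s => PySem.Chars.startswith s.toList pfx.toList) t with
      | none => simp
      | some j => simp; ring
    · simp [pfxScanMiss, h, PySem.List.index?, List.idxOf?, List.findIdx?_cons]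

-- ===== VERDICT (by name: the statement is the Claim_ definition above) =====
theorem pfxRange_spec : Claim_equal_pfxRange := by
  intro a pfx start _
  unfold Spec_pfxRange pfxRange pfxRange_alt
  dsimp only
  rw [pfxLoopA_none, pfxScanHit_eq_index]
  cases hs : PySem.List.index? ((PySem.List.slice a (some start) none).map (fun s => PySem.Str.startswith s pfx)) true with
  | none => rfl
  | some beg =>
    simp only [Option.map_some]
    rw [show (0 : Int) + (beg : Int) = (beg : Int) from by ring]
    rw [show (((beg : Int) - 0).toNat + 1) = beg + 1 from by omega]
    rw [pfxScanMiss_eq_index, List.map_drop]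
    cases PySem.List.index? (((PySem.List.slice a (some start) none).map (fun s => PySem.Str.startswith s pfx)).drop (beg + 1)) false with
    | none => rfl
    | some j => rfl
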